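-- pv_equiv track=rewrite | github.com/nik-sergeson/bsuir-informatics-labs | 8term/OR/lab5/Network.py | get_vertexes_neighbors
-- ===== SOURCE A (Python) =====
-- def get_vertexes_neighbors(arc_set):
--     adjacency_dict = {}
--     for i, j in arc_set:
--         if i in adjacency_dict:
--             adjacency_dict[i].append(j)
--         else:
--             adjacency_dict[i] = [j]
--         if j in adjacency_dict:
--             adjacency_dict[j].append(i)
--         else:
--             adjacency_dict[j] = [i]
--     adjacency_list = [()] * (max(adjacency_dict.keys()) + 1)
--     for i, neighb in adjacency_dict.items():
--         adjacency_list[i] = tuple(neighb)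
--     return tuple(adjacency_list)
-- ===== SOURCE B (Python) =====
-- def get_vertexes_neighbors(arc_set):
--     entries = [(v, w) for i, j in arc_set for v, w in ((i, j), (j, i))]
--     n = max(v for v, _ in entries)
--     return tuple(tuple(w for v, w in entries if v == c) for c in range(n + 1))
-- ===== Notes on version B (the rewrite author's own statement) =====
-- stated objective: alternative
-- what changed: B replaces A's mutate-as-you-go dict of append lists by a purely functional staged computation: it first flattens the arcs into a (vertex, neighbor) entry list, then builds each vertex's row by filtering that list per vertex of range(max+1) in a comprehension, with no dict, no indexed assignment and no appends; it trades O((V+E)) for a V*E per-vertex scan.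
-- outside the precondition, e.g. on get_vertexes_neighbors([(0, 2), (2, -1)]): A returns ((2,), (), (2,)), B returns ((2,), (), (0, -1)); on get_vertexes_neighbors([]): A raises ValueError, B raises ValueError; on get_vertexes_neighbors([(0, -5)]): A raises IndexError, B returns ((-5,),)
import Mathlib
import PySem

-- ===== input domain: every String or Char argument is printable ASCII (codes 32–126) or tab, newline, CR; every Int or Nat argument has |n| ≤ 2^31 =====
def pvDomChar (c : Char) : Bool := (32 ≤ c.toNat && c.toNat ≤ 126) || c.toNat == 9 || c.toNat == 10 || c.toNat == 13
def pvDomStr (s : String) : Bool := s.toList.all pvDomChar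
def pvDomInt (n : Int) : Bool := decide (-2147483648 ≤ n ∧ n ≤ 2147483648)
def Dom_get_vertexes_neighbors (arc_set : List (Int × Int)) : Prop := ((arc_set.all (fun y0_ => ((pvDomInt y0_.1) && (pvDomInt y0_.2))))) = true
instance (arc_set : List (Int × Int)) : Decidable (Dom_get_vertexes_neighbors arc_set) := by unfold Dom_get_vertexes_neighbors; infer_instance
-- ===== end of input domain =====

-- B replaces A's mutating dict-of-append-lists by a staged functional computation: flatten the
-- arcs to (vertex, neighbor) entries once, then build each row by filtering per vertex (objective: alternative).

-- ===== PORT A =====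
-- the two dict updates per arc: `if i in d: d[i].append(j) else: d[i] = [j]`, then the same for j
def gvnStepA (d : PySem.Dict Int (List Int)) (p : Int × Int) : PySem.Dict Int (List Int) :=
  let d1 := if d.contains p.1 then d.modify p.1 [] (· ++ [p.2]) else d.insert p.1 [p.2]
  if d1.contains p.2 then d1.modify p.2 [] (· ++ [p.1]) else d1.insert p.2 [p.1]

def get_vertexes_neighbors (arc_set : List (Int × Int)) : List (List Int) :=
  let adjacency_dict := arc_set.foldl gvnStepA PySem.Dict.empty
  match PySem.List.max? adjacency_dict.keys (fun x => x) with
  | none => []          -- max() on an empty dict raises ValueError in Python: excluded by Pre_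
  | some m =>
    -- `[()] * (max+1)`; `.toNat` is exact here since Pre_ forces 0 ≤ m
    let adjacency_list := List.replicate (m + 1).toNat ([] : List Int)
    -- `adjacency_list[i] = tuple(neighb)`; `.toNat` exact: Pre_ forces every key ≥ 0
    adjacency_dict.items.foldl (fun acc kv => acc.set kv.1.toNat kv.2) adjacency_list

-- ===== PORT B =====
def get_vertexes_neighbors_alt (arc_set : List (Int × Int)) : List (List Int) :=
  -- entries = [(v, w) for i, j in arc_set for v, w in ((i, j), (j, i))]
  let entries := arc_set.flatMap (fun p => [(p.1, p.2), (p.2, p.1)])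
  -- n = max(v for v, _ in entries): ValueError on empty, excluded by Pre_
  match PySem.List.max? (entries.map (·.1)) (fun x => x) with
  | none => []
  | some n =>
    -- tuple(tuple(w for v, w in entries if v == c) for c in range(n + 1))
    (PySem.List.pyRange 0 (n + 1) 1).map
      (fun c => (entries.filter (fun q => q.1 == c)).map (·.2))

-- ===== PRECONDITION & SPEC =====
-- Pre_ excludes the empty arc list (A raises ValueError) and arc sets containing a negative
-- vertex, where A's behaviour is an accident of Python's negative-index wraparound (it raises
-- IndexError, or silently overwrites a slot from the end): vertices are list indices, so the
-- natural domain is 0 ≤ v.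
def Pre_get_vertexes_neighbors (arc_set : List (Int × Int)) : Prop :=
  arc_set ≠ [] ∧ ∀ p ∈ arc_set, 0 ≤ p.1 ∧ 0 ≤ p.2
instance (arc_set : List (Int × Int)) : Decidable (Pre_get_vertexes_neighbors arc_set) := by
  unfold Pre_get_vertexes_neighbors; infer_instance

def pvWitness_get_vertexes_neighbors : (List (Int × Int)) := [(0, 2), (2, 1), (1, 1)]

def Spec_get_vertexes_neighbors (arc_set : List (Int × Int)) (out : List (List Int)) : Prop := out = get_vertexes_neighbors_alt arc_set
instance (arc_set : List (Int × Int)) (out : List (List Int)) : Decidable (Spec_get_vertexes_neighbors arc_set out) := by unfold Spec_get_vertexes_neighbors; infer_instance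

-- ===== CLAIM (what is proved, stated in full; the proofs are below) =====
def Claim_equal_get_vertexes_neighbors : Prop := ∀ (arc_set : List (Int × Int)), Dom_get_vertexes_neighbors arc_set → Pre_get_vertexes_neighbors arc_set → Spec_get_vertexes_neighbors arc_set (get_vertexes_neighbors arc_set)

-- ===== LEMMAS AND PROOFS =====

-- the flattened (source, neighbor) entry list: each arc (i, j) contributes (i, j), (j, i)
def gvnEntries (arc_set : List (Int × Int)) : List (Int × Int) :=
  arc_set.flatMap (fun p => [(p.1, p.2), (p.2, p.1)])

-- characterization of both outputs: the neighbor list of vertex c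
def gvnNbrs (arc_set : List (Int × Int)) (c : Int) : List Int :=
  ((gvnEntries arc_set).filter (fun q => q.1 == c)).map (·.2)

theorem gvn_if_modify (d : PySem.Dict Int (List Int)) (k w : Int) :
    (if d.contains k then d.modify k [] (· ++ [w]) else d.insert k [w]) = d.modify k [] (· ++ [w]) := by
  by_cases h : d.contains k
  · simp [h]
  · have hn : d.items.find? (fun p => p.1 == k) = none := by
      rw [List.find?_eq_none]; intro p hp
      simp only [PySem.Dict.contains, Bool.not_eq_true, List.any_eq_false] at h
      simpa using h p hp
    simp [h, PySem.Dict.modify, PySem.Dict.insert, PySem.Dict.getD, PySem.Dict.get?, hn]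

theorem gvn_stepA_eq (d : PySem.Dict Int (List Int)) (p : Int × Int) :
    gvnStepA d p = (d.modify p.1 [] (· ++ [p.2])).modify p.2 [] (· ++ [p.1]) := by
  show (if (if d.contains p.1 then d.modify p.1 [] (· ++ [p.2]) else d.insert p.1 [p.2]).contains p.2
          then (if d.contains p.1 then d.modify p.1 [] (· ++ [p.2]) else d.insert p.1 [p.2]).modify p.2 [] (· ++ [p.1])
          else (if d.contains p.1 then d.modify p.1 [] (· ++ [p.2]) else d.insert p.1 [p.2]).insert p.2 [p.1]) = _
  rw [gvn_if_modify d p.1 p.2, gvn_if_modify _ p.2 p.1]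

theorem gvn_foldl_pairs {S : Type} (f : S → Int × Int → S) (arcs : List (Int × Int)) (s : S) :
    arcs.foldl (fun s p => f (f s (p.1, p.2)) (p.2, p.1)) s = (gvnEntries arcs).foldl f s := by
  induction arcs generalizing s with
  | nil => rfl
  | cons a t ih => simp only [gvnEntries, List.flatMap_cons, List.foldl_append, List.foldl_cons] at *; exact ih _

theorem gvn_entries_fst (l : List (Int × Int)) :
    (gvnEntries l).map (·.1) = l.flatMap (fun p => [p.1, p.2]) := by
  induction l with
  | nil => rfl
  | cons a t ih => simpa [gvnEntries] using ih

theorem gvn_max_eq (xs : List Int) (hne : xs ≠ []) :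
    PySem.List.max? (PySem.Set.ofList xs) (fun x => x) = PySem.List.max? xs (fun x => x) := by
  obtain ⟨x, hx⟩ := List.exists_mem_of_ne_nil xs hne
  have hne2 : PySem.Set.ofList xs ≠ [] := List.ne_nil_of_mem ((PySem.Set.mem_ofList _ _).mpr hx)
  obtain ⟨a, ha⟩ := Option.ne_none_iff_exists'.mp (fun h => hne2 ((PySem.List.max?_eq_none_iff (PySem.Set.ofList xs) (fun x : Int => x)).mp h))
  obtain ⟨b, hb⟩ := Option.ne_none_iff_exists'.mp (fun h => hne ((PySem.List.max?_eq_none_iff xs (fun x : Int => x)).mp h))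
  rw [ha, hb]
  have hab : a ≤ b := PySem.List.max?_isMax hb a ((PySem.Set.mem_ofList _ _).mp (PySem.List.max?_mem ha))
  have hba : b ≤ a := PySem.List.max?_isMax ha b ((PySem.Set.mem_ofList _ _).mpr (PySem.List.max?_mem hb))
  exact congrArg some (le_antisymm hab hba)

theorem gvn_scatter_length (pairs : List (Int × List Int)) (acc : List (List Int)) :
    (pairs.foldl (fun a kv => a.set kv.1.toNat kv.2) acc).length = acc.length := by
  induction pairs generalizing acc with
  | nil => rfl
  | cons p t ih => rw [List.foldl_cons, ih]; simp

theorem gvn_scatter_getD (pairs : List (Int × List Int)) (acc : List (List Int))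
    (hnd : (pairs.map (·.1)).Nodup)
    (hb : ∀ p ∈ pairs, 0 ≤ p.1 ∧ p.1.toNat < acc.length) (n : Nat) :
    (pairs.foldl (fun a kv => a.set kv.1.toNat kv.2) acc)[n]?.getD [] =
      match pairs.find? (fun p => p.1 == (n : Int)) with
      | some p => p.2
      | none => acc[n]?.getD [] := by
  induction pairs generalizing acc with
  | nil => rfl
  | cons p t ih =>
    simp only [List.foldl_cons, List.find?_cons]
    by_cases hk : p.1 == (n : Int)
    · have hp1 : p.1 = (n : Int) := by simpa using hk
      have hlt : p.1.toNat < acc.length := (hb p (by simp)).2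
      have hfn : t.find? (fun q => q.1 == (n : Int)) = none := by
        rw [List.find?_eq_none]; intro q hq
        simp only [List.map_cons, List.nodup_cons] at hnd
        intro hbeq
        exact hnd.1 (by rw [List.mem_map]; exact ⟨q, hq, by rw [← hp1] at hbeq; simpa using hbeq⟩)
      rw [ih _ (by simpa using hnd.of_cons) (fun q hq => ⟨(hb q (by simp [hq])).1, by simpa using (hb q (by simp [hq])).2⟩), hfn]
      have hnn : p.1.toNat = n := by omega
      have hset : (acc.set p.1.toNat p.2)[n]? = some p.2 := by
        rw [hnn] at hlt ⊢; simp [hlt]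
      simp [hk, hset]
    · have hne : p.1.toNat ≠ n := by
        have h0 : 0 ≤ p.1 := (hb p (by simp)).1
        intro he; apply hk; simp; omega
      rw [ih _ (by simpa using hnd.of_cons) (fun q hq => ⟨(hb q (by simp [hq])).1, by simpa using (hb q (by simp [hq])).2⟩)]
      have hset : (acc.set p.1.toNat p.2)[n]? = acc[n]? := List.getElem?_set_ne hne
      simp only [Bool.not_eq_true] at hk
      simp [hk, hset]

-- ===== VERDICT (by name: the statement is the Claim_ definition above) =====
theorem get_vertexes_neighbors_spec : Claim_equal_get_vertexes_neighbors := by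
  intro arc_set _ hpre
  obtain ⟨hne, hpos⟩ := hpre
  unfold Spec_get_vertexes_neighbors get_vertexes_neighbors get_vertexes_neighbors_alt
  have hA : arc_set.foldl gvnStepA PySem.Dict.empty =
      (gvnEntries arc_set).foldl (fun d q => d.modify q.1 [] (· ++ [q.2])) PySem.Dict.empty := by
    have h1 : gvnStepA = fun (d : PySem.Dict Int (List Int)) (p : Int × Int) =>
        ((d.modify p.1 [] (· ++ [p.2])).modify p.2 [] (· ++ [p.1])) :=
      funext fun d => funext fun p => gvn_stepA_eq d p
    rw [h1]
    exact gvn_foldl_pairs (fun (dd : PySem.Dict Int (List Int)) q => dd.modify q.1 [] (· ++ [q.2])) arc_set _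
  set vlist := arc_set.flatMap (fun p => [p.1, p.2]) with hvlist
  have hvne : vlist ≠ [] := by
    cases arc_set with
    | nil => exact absurd rfl hne
    | cons a t => simp [hvlist]
  set d := (gvnEntries arc_set).foldl (fun (dd : PySem.Dict Int (List Int)) q => dd.modify q.1 [] (· ++ [q.2])) PySem.Dict.empty with hd
  have hkeys : d.keys = PySem.Set.ofList vlist := by
    rw [hd]
    simp only [PySem.Dict.keys_foldl_modify_key, PySem.Set.update_nil_left, PySem.Dict.keys_empty]
    rw [gvn_entries_fst]
  have hnodup : d.keys.Nodup := by
    rw [hd]; apply PySem.Dict.nodup_keys_foldl_modify_key; simp [PySem.Dict.keys_empty]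
  have hgetD : ∀ c : Int, d.getD c [] = gvnNbrs arc_set c := by
    intro c; rw [hd]; simp [PySem.Dict.getD_foldl_modify_append, gvnNbrs]
  obtain ⟨m, hm⟩ : ∃ m, PySem.List.max? vlist (fun x => x) = some m := by
    cases hmm : PySem.List.max? vlist (fun x => x) with
    | none => exact absurd ((PySem.List.max?_eq_none_iff vlist (fun x : Int => x)).mp hmm) hvne
    | some m => exact ⟨m, rfl⟩
  have hmaxk : PySem.List.max? d.keys (fun x => x) = some m := by
    rw [hkeys, gvn_max_eq vlist hvne, hm]
  have hvfst : (gvnEntries arc_set).map (·.1) = vlist := gvn_entries_fst arc_set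
  have hvpos : ∀ v ∈ vlist, 0 ≤ v := by
    intro v hv
    rw [hvlist, List.mem_flatMap] at hv
    obtain ⟨p, hp, hvp⟩ := hv
    simp only [List.mem_cons, List.not_mem_nil, or_false] at hvp
    rcases hvp with h | h
    · exact h ▸ (hpos p hp).1
    · exact h ▸ (hpos p hp).2
  have hvle : ∀ v ∈ vlist, v ≤ m := PySem.List.max?_isMax hm
  have hmB : PySem.List.max?
      ((arc_set.flatMap (fun p => [(p.1, p.2), (p.2, p.1)])).map (·.1)) (fun x => x) = some m := by
    show PySem.List.max? ((gvnEntries arc_set).map (·.1)) (fun x => x) = some m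
    rw [hvfst]; exact hm
  simp only [hA]

  simp only [hmaxk, hmB]
  have hm0 : 0 ≤ m := by
    obtain ⟨x, hx⟩ := List.exists_mem_of_ne_nil vlist hvne
    exact le_trans (hvpos x hx) (hvle x hx)
  have hlenr : (List.replicate (m + 1).toNat ([] : List Int)).length = (m + 1).toNat :=
    List.length_replicate
  have hitemsb : ∀ p ∈ d.items, 0 ≤ p.1 ∧ p.1.toNat < (m + 1).toNat := by
    intro p hp
    have hpk : p.1 ∈ vlist := by
      have h1 : p.1 ∈ d.keys := List.mem_map_of_mem (f := fun q => q.1) hp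
      rw [hkeys] at h1
      exact (PySem.Set.mem_ofList _ _).mp h1
    have := hvpos _ hpk; have := hvle _ hpk
    constructor
    · assumption
    · omega
  apply List.ext_getElem?
  intro n
  have hAn := gvn_scatter_getD d.items (List.replicate (m + 1).toNat ([] : List Int))
      hnodup (by simpa [hlenr] using hitemsb) n
  -- A's n-th entry (as a getD) is gvnNbrs arc_set n
  have hAval : (d.items.foldl (fun a kv => a.set kv.1.toNat kv.2)
      (List.replicate (m + 1).toNat ([] : List Int)))[n]?.getD [] = gvnNbrs arc_set (n : Int) := by
    rw [hAn]
    cases hf : d.items.find? (fun p => p.1 == (n : Int)) with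
    | some p =>
      have hmem := List.mem_of_find?_eq_some hf
      have hpn : p.1 = (n : Int) := by simpa using List.find?_some hf
      have := PySem.Dict.getD_of_mem_items (d := d) (k := p.1) (v := p.2) (d0 := []) hmem hnodup
      show p.2 = gvnNbrs arc_set (n : Int)
      rw [← hpn, ← this, hgetD]
    | none =>
      have hnk : (n : Int) ∉ (gvnEntries arc_set).map (·.1) := by
        intro hmemv
        have : (n : Int) ∈ d.keys := by
          rw [hkeys]
          exact (PySem.Set.mem_ofList _ _).mpr (hvfst ▸ hmemv)
        obtain ⟨p, hp, hp1⟩ := List.mem_map.mp this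
        have := List.find?_eq_none.mp hf p hp
        simp [hp1] at this
      have hfil : (gvnEntries arc_set).filter (fun q => q.1 == (n : Int)) = [] := by
        rw [List.filter_eq_nil_iff]
        intro q hq hbeq
        exact hnk (List.mem_map.mpr ⟨q, hq, by simpa using hbeq⟩)
      simp [gvnNbrs, hfil]
  have hlenA : (d.items.foldl (fun a kv => a.set kv.1.toNat kv.2)
      (List.replicate (m + 1).toNat ([] : List Int))).length = (m + 1).toNat := by
    rw [gvn_scatter_length, hlenr]
  -- B's side: the range-map list
  have hlenB : ((PySem.List.pyRange 0 (m + 1) 1).map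
      (fun c => ((arc_set.flatMap (fun p => [(p.1, p.2), (p.2, p.1)])).filter (fun q => q.1 == c)).map (·.2))).length
      = (m + 1).toNat := by
    rw [List.length_map, PySem.List.length_pyRange_one]; omega
  by_cases hn : n < (m + 1).toNat
  · have hBn : ((PySem.List.pyRange 0 (m + 1) 1).map
        (fun c => ((arc_set.flatMap (fun p => [(p.1, p.2), (p.2, p.1)])).filter (fun q => q.1 == c)).map (·.2)))[n]?
        = some (gvnNbrs arc_set (n : Int)) := by
      rw [List.getElem?_map, PySem.List.getElem?_pyRange_one]
      have hn' : n < (m + 1 - 0).toNat := by omega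
      simp only [hn', if_pos]
      show some (gvnNbrs arc_set (0 + (n : Int))) = some (gvnNbrs arc_set (n : Int))
      rw [Int.zero_add]
    rw [hBn, List.getElem?_eq_getElem (by rw [hlenA]; exact hn)]
    have h1 := hAval
    rw [List.getElem?_eq_getElem (by rw [hlenA]; exact hn)] at h1
    simp only [Option.getD_some] at h1
    rw [h1]
  · rw [List.getElem?_eq_none (by rw [hlenA]; omega), List.getElem?_eq_none (by rw [hlenB]; omega)]
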